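-- pv_equiv track=rewrite | github.com/m1n5eo/Baekjoon | Codewars/The @ operator/The @ operator.py | evaluate
-- ===== SOURCE A (Python) =====
-- def evaluate(equation):
--     sp = equation.split()
--     ans = int(sp[0])
--     for i in range(2, len(sp), 2):
--         k = int(sp[i])
--         if k == 0:
--             return None
--         ans = (ans+k) + (ans-k) + (ans*k) + (ans//k)
--     return ans
-- ===== SOURCE B (Python) =====
-- def evaluate(equation):
--     def go(ans, rest):
--         if len(rest) < 2:
--             return ans
--         k = int(rest[1])
--         if k == 0:
--             return None
--         return go(ans * (k + 2) + ans // k, rest[2:])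
--     sp = equation.split()
--     return go(int(sp[0]), sp[1:])
-- ===== Notes on version B (the rewrite author's own statement) =====
-- stated objective: alternative
-- what changed: A's indexed for-loop over range(2, len(sp), 2) with an interleaved accumulator is replaced by a recursive pairwise consumer: a helper recurses on the token list two tokens (operator, operand) at a time, threading the accumulator with the algebraically simplified update ans*(k+2) + ans//k in place of A's four-term sum.
import Mathlib
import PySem

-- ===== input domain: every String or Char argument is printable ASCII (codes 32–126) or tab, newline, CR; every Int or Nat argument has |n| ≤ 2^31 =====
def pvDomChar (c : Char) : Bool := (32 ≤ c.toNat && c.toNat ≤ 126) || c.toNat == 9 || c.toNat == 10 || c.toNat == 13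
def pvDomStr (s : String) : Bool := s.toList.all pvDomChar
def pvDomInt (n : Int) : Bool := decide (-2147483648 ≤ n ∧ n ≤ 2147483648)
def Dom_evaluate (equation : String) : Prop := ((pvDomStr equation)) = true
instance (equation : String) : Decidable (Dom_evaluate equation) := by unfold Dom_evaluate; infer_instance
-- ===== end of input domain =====

-- B replaces A's indexed loop over range(2, len, 2) by a recursive helper consuming the
-- token list two tokens (operator, operand) at a time, with the simplified update
-- ans*(k+2) + ans//k.  Objective: alternative decomposition, same cost.

-- ===== PORT A =====
-- int(sp[i]) raises ValueError on a non-integer token and sp[0] raises IndexError on an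
-- empty equation: modelled as .getD 0 / default ""; such inputs are outside Pre_evaluate.
def evaluate (equation : String) : Option Int :=
  let sp := PySem.Str.split₀ equation
  let ans0 := (PySem.Int.ofStr? (PySem.List.pyGetD sp 0 "")).getD 0
  (PySem.List.pyRange 2 (sp.length : Int) 2).foldl
    (fun acc i =>
      match acc with
      | none => none
      | some ans =>
        let k := (PySem.Int.ofStr? (PySem.List.pyGetD sp i "")).getD 0
        if k = 0 then none
        else some ((ans + k) + (ans - k) + (ans * k) + PySem.Int.floordiv ans k))
    (some ans0)

-- ===== PORT B =====
-- go(ans, rest): rest shorter than 2 returns ans; otherwise rest[1] is the next operand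
-- (int() modelled as .getD 0, outside Pre_evaluate on failure) and recursion on rest[2:].
def evaluateGo : Int → List String → Option Int
  | ans, [] => some ans
  | ans, [_] => some ans
  | ans, _ :: b :: rest =>
    let k := (PySem.Int.ofStr? b).getD 0
    if k = 0 then none
    else evaluateGo (ans * (k + 2) + PySem.Int.floordiv ans k) rest

def evaluate_alt (equation : String) : Option Int :=
  let sp := PySem.Str.split₀ equation
  evaluateGo ((PySem.Int.ofStr? (PySem.List.pyGetD sp 0 "")).getD 0)
    (PySem.List.slice sp (some 1) none)

-- ===== PRECONDITION & SPEC =====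
-- Pre_ holds exactly when the Python A returns normally: the equation has a first token,
-- it parses as an int, and every even-position token A actually reaches (i.e. with no
-- earlier even-position operand equal to 0) parses as an int.
def Pre_evaluate (equation : String) : Prop :=
  let sp := PySem.Str.split₀ equation
  sp ≠ [] ∧ (PySem.Int.ofStr? (sp.getD 0 "")).isSome = true ∧
  ∀ i : Nat, i < sp.length →
    (2 ≤ i ∧ i % 2 = 0 ∧ ∀ j : Nat, j < i → (2 ≤ j ∧ j % 2 = 0) →
      (PySem.Int.ofStr? (sp.getD j "")).getD 0 ≠ 0) →
    (PySem.Int.ofStr? (sp.getD i "")).isSome = true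
instance (equation : String) : Decidable (Pre_evaluate equation) := by
  unfold Pre_evaluate; infer_instance
def pvWitness_evaluate : String := "3 @ 2 @ -4"
def Spec_evaluate (equation : String) (out : Option Int) : Prop := out = evaluate_alt equation
instance (equation : String) (out : Option Int) : Decidable (Spec_evaluate equation out) := by unfold Spec_evaluate; infer_instance

-- ===== CLAIM (what is proved, stated in full; the proofs are below) =====
def Claim_equal_evaluate : Prop := ∀ (equation : String), Dom_evaluate equation → Pre_evaluate equation → Spec_evaluate equation (evaluate equation)

-- ===== LEMMAS AND PROOFS =====

-- the operand tokens: every second element starting at index 1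
def opsOdd {α : Type} : List α → List α
  | [] => []
  | [_] => []
  | _ :: b :: t => b :: opsOdd t

theorem foldl_none {f : Int → Int → Int} (ks : List Int) :
    ks.foldl (fun acc k => match acc with
      | none => none
      | some ans => if k = 0 then none else some (f ans k)) none = none := by
  induction ks with
  | nil => rfl
  | cons k t ih => simpa using ih

theorem foldl_opt {f : Int → Int → Int} (ks : List Int) (a : Int) :
    ks.foldl (fun acc k => match acc with
      | none => none
      | some ans => if k = 0 then none else some (f ans k)) (some a)
    = if ks.contains 0 then none else some (ks.foldl f a) := by
  induction ks generalizing a with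
  | nil => simp
  | cons k t ih =>
    by_cases hk : k = 0
    · subst hk
      simp only [List.foldl_cons, List.contains_cons]
      show t.foldl _ (if (0:Int) = 0 then none else some (f a 0)) = _
      rw [if_pos rfl, foldl_none]
      simp
    · have h0 : ((0 : Int) == k) = false := beq_eq_false_iff_ne.mpr (Ne.symm hk)
      simp only [List.foldl_cons, List.contains_cons, h0, Bool.false_or]
      show t.foldl _ (if k = 0 then none else some (f a k)) = _
      rw [if_neg hk, ih]

theorem foldl_opt_map {f : Int → Int → Int} (p : Int → Int) (l : List Int) (a : Int) :
    l.foldl (fun acc i => match acc with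
      | none => none
      | some ans => if p i = 0 then none else some (f ans (p i))) (some a)
    = if (l.map p).contains 0 then none else some ((l.map p).foldl f a) := by
  have h := foldl_opt (f := f) (l.map p) a
  rw [List.foldl_map] at h
  exact h

-- B's recursion equals the early-exit fold over its operand tokens
theorem go_eq : ∀ (rest : List String) (a : Int),
    evaluateGo a rest
    = ((opsOdd rest).map (fun tok => (PySem.Int.ofStr? tok).getD 0)).foldl
        (fun acc k => match acc with
          | none => none
          | some ans => if k = 0 then none
            else some (ans * (k + 2) + PySem.Int.floordiv ans k)) (some a)
  | [], _ => rfl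
  | [_], _ => rfl
  | _ :: b :: t, a => by
    simp only [evaluateGo, opsOdd, List.map_cons, List.foldl_cons]
    by_cases hk : (PySem.Int.ofStr? b).getD 0 = 0
    · rw [if_pos hk]
      show _ = List.foldl _ (if (PySem.Int.ofStr? b).getD 0 = 0 then none else _) _
      rw [if_pos hk, foldl_none]
    · rw [if_neg hk]
      show _ = List.foldl _ (if (PySem.Int.ofStr? b).getD 0 = 0 then none else _) _
      rw [if_neg hk, go_eq]

-- range(2, len, 2) step 2 peels off index 2 when at least one index remains
theorem pr2_cons (m : Int) (h : 1 ≤ m) :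
    PySem.List.pyRange 2 (m + 2) 2 = 2 :: (PySem.List.pyRange 2 m 2).map (· + 2) := by
  rw [PySem.List.pyRange_of_pos _ _ (by norm_num : (0:Int) < 2),
      PySem.List.pyRange_of_pos _ _ (by norm_num : (0:Int) < 2)]
  have h1 : (if (2:Int) < m + 2 then ((m + 2 - 2 + 2 - 1) / 2).toNat else 0)
      = (if (2:Int) < m then ((m - 2 + 2 - 1) / 2).toNat else 0) + 1 := by
    split_ifs <;> omega
  rw [h1, List.range_succ_eq_map]
  simp only [List.map_cons, List.map_map]
  refine congrArg₂ _ (by norm_num) (List.map_congr_left ?_)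
  intro k _
  simp only [Function.comp_apply]
  push_cast
  ring

-- the even indices ≥ 2 of l, read through pyGetD, are the operand tokens of l.drop 1
theorem R : ∀ (l : List String) (d : String),
    (PySem.List.pyRange 2 (l.length : Int) 2).map (fun i => PySem.List.pyGetD l i d)
    = opsOdd (l.drop 1)
  | [], d => by
    simp [show PySem.List.pyRange 2 (0:Int) 2 = [] from by decide, opsOdd]
  | [x], d => by
    simp [show PySem.List.pyRange 2 (1:Int) 2 = [] from by decide, opsOdd]
  | [x, y], d => by
    simp [show PySem.List.pyRange 2 (2:Int) 2 = [] from by decide, opsOdd]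
  | x :: y :: z :: t, d => by
    have hm : (1:Int) ≤ ((z :: t).length : Int) := by
      simp only [List.length_cons]; push_cast; omega
    have hn : ((x :: y :: z :: t).length : Int) = ((z :: t).length : Int) + 2 := by
      simp only [List.length_cons]; push_cast; ring
    rw [hn, pr2_cons _ hm]
    simp only [List.map_cons, List.map_map]
    have hhead : PySem.List.pyGetD (x :: y :: z :: t) 2 d = z := by
      rw [PySem.List.pyGetD_eq_getElem _ _ (by norm_num)
        (by simp only [List.length_cons]; push_cast; omega)]
      rfl
    have htail : ((PySem.List.pyRange 2 ((z :: t).length : Int) 2).map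
        ((fun i => PySem.List.pyGetD (x :: y :: z :: t) i d) ∘ (· + 2)))
        = (PySem.List.pyRange 2 ((z :: t).length : Int) 2).map
          (fun i => PySem.List.pyGetD (z :: t) i d) := by
      refine List.map_congr_left ?_
      intro i hi
      have hmem := (PySem.List.mem_pyRange_iff_of_pos (by norm_num : (0:Int) < 2) i).mp hi
      have h2i : 2 ≤ i := hmem.1
      have hilt : i < ((z :: t).length : Int) := hmem.2.1
      simp only [Function.comp_apply]
      rw [PySem.List.pyGetD_eq_getElem _ _ (by omega)
            (by simp only [List.length_cons] at hilt ⊢; push_cast at hilt ⊢; omega),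
          PySem.List.pyGetD_eq_getElem _ _ (by omega) hilt]
      have hti : (i + 2).toNat = i.toNat + 2 := by omega
      simp only [hti, List.getElem_cons_succ]
    rw [htail, R (z :: t) d]
    simp only [opsOdd, List.drop_succ_cons, List.drop_zero, hhead]

theorem evaluate_eq_alt (equation : String) : evaluate equation = evaluate_alt equation := by
  simp only [evaluate, evaluate_alt]
  rw [PySem.List.slice_from_one, ← List.drop_one, go_eq, foldl_opt,
      ← R (PySem.Str.split₀ equation) ""]
  have hcomp : ((PySem.List.pyRange 2 ((PySem.Str.split₀ equation).length : Int) 2).map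
        (fun i => PySem.List.pyGetD (PySem.Str.split₀ equation) i "")).map
        (fun tok => (PySem.Int.ofStr? tok).getD 0)
      = (PySem.List.pyRange 2 ((PySem.Str.split₀ equation).length : Int) 2).map
        (fun i => (PySem.Int.ofStr? (PySem.List.pyGetD (PySem.Str.split₀ equation) i "")).getD 0) := by
    rw [List.map_map]; rfl
  rw [hcomp]
  have hFG : (fun (ans k : Int) => ans * (k + 2) + PySem.Int.floordiv ans k)
      = (fun (ans k : Int) => (ans + k) + (ans - k) + (ans * k) + PySem.Int.floordiv ans k) := by
    funext a k; ring
  rw [hFG]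
  exact foldl_opt_map
    (f := fun ans k => (ans + k) + (ans - k) + (ans * k) + PySem.Int.floordiv ans k)
    (fun i => (PySem.Int.ofStr? (PySem.List.pyGetD (PySem.Str.split₀ equation) i "")).getD 0)
    (PySem.List.pyRange 2 ((PySem.Str.split₀ equation).length : Int) 2)
    ((PySem.Int.ofStr? (PySem.List.pyGetD (PySem.Str.split₀ equation) 0 "")).getD 0)

-- ===== VERDICT (by name: the statement is the Claim_ definition above) =====
theorem evaluate_spec : Claim_equal_evaluate := by
  intro equation _ _
  unfold Spec_evaluate
  exact evaluate_eq_alt equation
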